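-- pv_equiv track=rewrite | github.com/joffilyfe/leetcode | 1351.py | binary_search_for_the_first_negative_number
-- ===== SOURCE A (Python) =====
-- from typing import List
--
-- def binary_search_for_the_first_negative_number(nums: List[int], size: int) -> int:
--     left = 0
--     right = size - 1
--
--     while left <= right:
--         middle = (left + right) // 2
--
--         if nums[middle] > 0 or nums[middle] == 0:
--             left += 1
--         elif nums[middle] < 0:
--             right -= 1
--
--     return size - left
-- ===== SOURCE B (Python) =====
-- def binary_search_for_the_first_negative_number(nums, size):
--     lo, hi = 0, size
--     while lo < hi:
--         mid = (lo + hi) // 2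
--         if nums[mid] >= 0:
--             lo = mid + 1
--         else:
--             hi = mid
--     return size - lo
-- ===== Notes on version B (the rewrite author's own statement) =====
-- stated objective: faster
-- what changed: A creeps one index per iteration with a degenerate two-pointer loop (O(n)); B is a true binary search that halves the interval, returning size minus the first negative index (O(log n)).
-- outside the precondition, e.g. on binary_search_for_the_first_negative_number([-1, 5], 2): A returns 2, B returns 0; on binary_search_for_the_first_negative_number([-1], 2): A returns 2, B raises IndexError
import Mathlib
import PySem

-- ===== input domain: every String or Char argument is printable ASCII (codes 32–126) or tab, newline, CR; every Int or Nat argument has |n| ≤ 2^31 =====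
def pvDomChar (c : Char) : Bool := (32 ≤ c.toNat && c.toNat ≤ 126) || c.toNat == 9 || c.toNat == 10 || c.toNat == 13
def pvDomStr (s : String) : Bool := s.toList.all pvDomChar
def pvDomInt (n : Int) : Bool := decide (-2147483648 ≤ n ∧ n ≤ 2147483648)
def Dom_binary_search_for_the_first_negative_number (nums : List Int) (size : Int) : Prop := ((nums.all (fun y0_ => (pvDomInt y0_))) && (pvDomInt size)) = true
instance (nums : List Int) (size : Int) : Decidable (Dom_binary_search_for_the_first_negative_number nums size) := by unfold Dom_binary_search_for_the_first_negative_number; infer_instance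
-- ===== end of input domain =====

-- B replaces A's one-step-at-a-time pointer creep by a true binary search for the
-- first negative index (objective: faster; asymptotic, measured).


-- ===== PORT A =====
-- A's while loop: left/right each move by ONE per iteration; nums[middle] via pyGet?
-- (none = IndexError, excluded by Pre_; the 0 returned there is never claimed about).
def pvLoopA (nums : List Int) (left right : Int) : Int :=
  if _h : left ≤ right then
    let middle := PySem.Int.floordiv (left + right) 2
    match PySem.List.pyGet? nums middle with
    | none => 0
    | some v =>
      if v > 0 ∨ v = 0 then pvLoopA nums (left + 1) right
      else pvLoopA nums left (right - 1)
  else left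
termination_by (right + 1 - left).toNat
decreasing_by all_goals omega

def binary_search_for_the_first_negative_number (nums : List Int) (size : Int) : Int :=
  size - pvLoopA nums 0 (size - 1)

-- ===== PORT B =====
-- B's while loop: halve the interval [lo, hi) around mid = (lo+hi)//2.
def pvLoopB (nums : List Int) (lo hi : Int) : Int :=
  if _h : lo < hi then
    let mid := PySem.Int.floordiv (lo + hi) 2
    match PySem.List.pyGet? nums mid with
    | none => 0
    | some v =>
      if v ≥ 0 then pvLoopB nums (mid + 1) hi
      else pvLoopB nums lo mid
  else lo
termination_by (hi - lo).toNat
decreasing_by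
  all_goals
    have h1 := PySem.Int.floordiv_two_mid_bounds (le_of_lt _h)
    have h2 : PySem.Int.floordiv (lo + hi) 2 < hi := by
      rw [PySem.Int.floordiv_lt_iff_lt_mul (by omega)]; omega
    omega

def binary_search_for_the_first_negative_number_alt (nums : List Int) (size : Int) : Int :=
  size - pvLoopB nums 0 size

-- ===== PRECONDITION & SPEC =====
-- Pre_ excludes (a) size > len(nums), where one of the two programs raises IndexError,
-- and (b) inputs whose first `size` elements are not sorted non-increasingly (the
-- documented domain of LeetCode 1351's binary search): there A's probe pattern returns
-- an accidental value no search specification covers (see cites).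
def Pre_binary_search_for_the_first_negative_number (nums : List Int) (size : Int) : Prop :=
  size ≤ nums.length ∧ List.Pairwise (fun a b => b ≤ a) (nums.take size.toNat)
instance (nums : List Int) (size : Int) : Decidable (Pre_binary_search_for_the_first_negative_number nums size) := by unfold Pre_binary_search_for_the_first_negative_number; infer_instance

def pvWitness_binary_search_for_the_first_negative_number : List Int × Int := ([5, 3, 0, -1, -4], 5)

def Spec_binary_search_for_the_first_negative_number (nums : List Int) (size : Int) (out : Int) : Prop := out = binary_search_for_the_first_negative_number_alt nums size
instance (nums : List Int) (size : Int) (out : Int) : Decidable (Spec_binary_search_for_the_first_negative_number nums size out) := by unfold Spec_binary_search_for_the_first_negative_number; infer_instance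

-- ===== CLAIM (what is proved, stated in full; the proofs are below) =====
def Claim_equal_binary_search_for_the_first_negative_number : Prop := ∀ (nums : List Int) (size : Int), Dom_binary_search_for_the_first_negative_number nums size → Pre_binary_search_for_the_first_negative_number nums size → Spec_binary_search_for_the_first_negative_number nums size (binary_search_for_the_first_negative_number nums size)

-- ===== LEMMAS AND PROOFS =====

-- k p = number of leading nonnegative elements of p; for a non-increasing p,
-- p[i] is nonnegative exactly for i < k p, and both loops converge to k p.
def pvK (p : List Int) : Nat := (p.takeWhile (fun x => decide (0 ≤ x))).length

theorem pvK_cons (a : Int) (p : List Int) :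
    pvK (a :: p) = if 0 ≤ a then pvK p + 1 else 0 := by
  by_cases h : 0 ≤ a <;> simp [pvK, h]

theorem pvK_le (p : List Int) : pvK p ≤ p.length := by
  induction p with
  | nil => simp [pvK]
  | cons a p ih => rw [pvK_cons]; split <;> simp only [List.length_cons] <;> omega

theorem pvK_iff (p : List Int) (hs : List.Pairwise (fun a b => b ≤ a) p) :
    ∀ i (hi : i < p.length), (0 ≤ p[i] ↔ i < pvK p) := by
  induction p with
  | nil => intro i hi; simp at hi
  | cons a p ih =>
    intro i hi
    rcases List.pairwise_cons.mp hs with ⟨ha, hp⟩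
    rw [pvK_cons]
    by_cases h0 : 0 ≤ a
    · rw [if_pos h0]
      cases i with
      | zero => simp [h0]
      | succ i =>
        simp only [List.getElem_cons_succ]
        rw [ih hp i (by simpa using hi)]
        omega
    · rw [if_neg h0]
      cases i with
      | zero => simp only [List.getElem_cons_zero]; omega
      | succ i =>
        simp only [List.getElem_cons_succ]
        have := ha _ (List.getElem_mem (by simpa using hi))
        omega

theorem pvLoopA_eq (nums : List Int) (size : Int) (hsz : size ≤ (nums.length : Int))
    (hs : List.Pairwise (fun a b => b ≤ a) (nums.take size.toNat)) :
    ∀ n (l r : Int), (r + 1 - l).toNat = n → 0 ≤ l →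
      l ≤ (pvK (nums.take size.toNat) : Int) →
      (pvK (nums.take size.toNat) : Int) - 1 ≤ r → r ≤ size - 1 →
      pvLoopA nums l r = pvK (nums.take size.toNat) := by
  intro n
  induction n using Nat.strong_induction_on with
  | _ n IH =>
    intro l r hn h0 hlk hkr hr
    rw [pvLoopA]
    split
    · rename_i hlr
      have hmid := PySem.Int.floordiv_two_mid_bounds (lo := l) (hi := r) hlr
      set m := PySem.Int.floordiv (l + r) 2 with hm
      have hmlen : m < (nums.length : Int) := by omega
      simp only [PySem.List.pyGet?_eq_some_getElem nums (by omega : (0:Int) ≤ m) hmlen]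
      have hmtake : m.toNat < (nums.take size.toNat).length := by
        simp only [List.length_take]; omega
      have hsame : nums[m.toNat]'(by omega) = (nums.take size.toNat)[m.toNat]'hmtake := by
        rw [List.getElem_take]
      have hiff := pvK_iff _ hs m.toNat hmtake
      split
      · rename_i hv
        have hmk : m.toNat < pvK (nums.take size.toNat) := by
          rw [← hiff]; rw [← hsame]; omega
        exact IH _ (by omega) (l + 1) r rfl (by omega) (by omega) hkr hr
      · rename_i hv
        have hmk : ¬ m.toNat < pvK (nums.take size.toNat) := by
          rw [← hiff]; rw [← hsame]; omega
        exact IH _ (by omega) l (r - 1) rfl h0 hlk (by omega) (by omega)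
    · omega

theorem pvLoopB_eq (nums : List Int) (size : Int) (hsz : size ≤ (nums.length : Int))
    (hs : List.Pairwise (fun a b => b ≤ a) (nums.take size.toNat)) :
    ∀ n (lo hi : Int), (hi - lo).toNat = n → 0 ≤ lo →
      lo ≤ (pvK (nums.take size.toNat) : Int) →
      (pvK (nums.take size.toNat) : Int) ≤ hi → hi ≤ size →
      pvLoopB nums lo hi = pvK (nums.take size.toNat) := by
  intro n
  induction n using Nat.strong_induction_on with
  | _ n IH =>
    intro lo hi hn h0 hlk hkh hh
    rw [pvLoopB]
    split
    · rename_i hlh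
      have hmid := PySem.Int.floordiv_two_mid_bounds (lo := lo) (hi := hi) (le_of_lt hlh)
      have hstrict : PySem.Int.floordiv (lo + hi) 2 < hi := by
        rw [PySem.Int.floordiv_lt_iff_lt_mul (by omega)]; omega
      set m := PySem.Int.floordiv (lo + hi) 2 with hm
      have hmlen : m < (nums.length : Int) := by omega
      simp only [PySem.List.pyGet?_eq_some_getElem nums (by omega : (0:Int) ≤ m) hmlen]
      have hmtake : m.toNat < (nums.take size.toNat).length := by
        simp only [List.length_take]; omega
      have hsame : nums[m.toNat]'(by omega) = (nums.take size.toNat)[m.toNat]'hmtake := by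
        rw [List.getElem_take]
      have hiff := pvK_iff _ hs m.toNat hmtake
      split
      · rename_i hv
        have hmk : m.toNat < pvK (nums.take size.toNat) := by
          rw [← hiff]; rw [← hsame]; omega
        exact IH _ (by omega) (m + 1) hi rfl (by omega) (by omega) hkh hh
      · rename_i hv
        have hmk : ¬ m.toNat < pvK (nums.take size.toNat) := by
          rw [← hiff]; rw [← hsame]; omega
        exact IH _ (by omega) lo m rfl h0 hlk (by omega) (by omega)
    · omega

-- ===== VERDICT (by name: the statement is the Claim_ definition above) =====
theorem binary_search_for_the_first_negative_number_spec : Claim_equal_binary_search_for_the_first_negative_number := by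
  intro nums size _hdom hpre
  rcases hpre with ⟨hsz, hs⟩
  unfold Spec_binary_search_for_the_first_negative_number
  unfold binary_search_for_the_first_negative_number binary_search_for_the_first_negative_number_alt
  by_cases hp : 0 < size
  · have hklen : pvK (nums.take size.toNat) ≤ (nums.take size.toNat).length := pvK_le _
    have hlen : (nums.take size.toNat).length = size.toNat := by
      simp only [List.length_take]; omega
    have hk : (pvK (nums.take size.toNat) : Int) ≤ size := by omega
    rw [pvLoopA_eq nums size hsz hs _ 0 (size - 1) rfl (by omega) (by omega) (by omega) (by omega),
        pvLoopB_eq nums size hsz hs _ 0 size rfl (by omega) (by omega) (by omega) (by omega)]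
  · rw [pvLoopA, pvLoopB]
    rw [dif_neg (by omega), dif_neg (by omega)]
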